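-- pv_equiv track=rewrite | github.com/benjaminfjones/advent-of-code-2018 | d3.py | histo
-- ===== SOURCE A (Python) =====
-- from typing import List, Tuple, Dict
--
-- Claim = Tuple[int, int, int, int, int]
--
-- Histogram = Dict[Tuple[int,int], int]
--
-- def histo(cs: List[Claim]) -> Histogram:
--     res = {}
--     for c in cs:
--         base_pos = (c[1], c[2])
--         for x in range(c[3]):
--             for y in range(c[4]):
--                 pos = (base_pos[0] + x, base_pos[1] + y)
--                 if pos in res:
--                     res[pos] = res[pos] + 1
--                 else:
--                     res[pos] = 1
--     return res
-- ===== SOURCE B (Python) =====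
-- from typing import List, Tuple, Dict
--
-- Claim = Tuple[int, int, int, int, int]
-- Histogram = Dict[Tuple[int, int], int]
--
-- def histo(cs: List[Claim]) -> Histogram:
--     # Pass 1: the covered cells, in first-seen order (dedup via dict.fromkeys).
--     cells = [(x, y)
--              for c in cs
--              for x in range(c[1], c[1] + c[3])
--              for y in range(c[2], c[2] + c[4])]
--     # Pass 2: for each distinct cell, count the claims whose rectangle contains it.
--     return {p: sum(1 for c in cs
--                    if c[1] <= p[0] < c[1] + c[3] and c[2] <= p[1] < c[2] + c[4])
--             for p in dict.fromkeys(cells)}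
-- ===== Notes on version B (the rewrite author's own statement) =====
-- stated objective: alternative
-- what changed: B makes two passes instead of incrementing a dict cell by cell: it first lists the covered cells and deduplicates them in first-seen order, then computes each distinct cell's count by testing rectangle containment against every claim.
import Mathlib
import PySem

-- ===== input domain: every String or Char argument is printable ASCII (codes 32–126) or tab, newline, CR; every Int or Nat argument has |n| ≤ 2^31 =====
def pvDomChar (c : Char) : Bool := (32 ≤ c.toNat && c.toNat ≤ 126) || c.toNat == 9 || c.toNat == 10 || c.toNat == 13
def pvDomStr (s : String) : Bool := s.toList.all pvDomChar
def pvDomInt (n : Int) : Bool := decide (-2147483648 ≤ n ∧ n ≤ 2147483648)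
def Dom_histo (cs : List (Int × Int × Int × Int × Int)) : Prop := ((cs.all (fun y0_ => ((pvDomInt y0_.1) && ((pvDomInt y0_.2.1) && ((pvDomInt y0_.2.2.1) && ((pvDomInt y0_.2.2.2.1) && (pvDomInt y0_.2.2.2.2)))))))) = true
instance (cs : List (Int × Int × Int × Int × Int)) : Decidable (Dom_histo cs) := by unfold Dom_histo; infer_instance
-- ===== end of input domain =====

-- B replaces A's cell-by-cell dict increments by two passes: collect the distinct covered
-- cells in first-seen order, then count for each cell the claims whose rectangle contains it
-- (alternative algorithm, not faster: its counting pass costs O(distinct cells * claims)).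


-- ===== PORT A =====
def histo (cs : List (Int × Int × Int × Int × Int)) : List (Int × Int × Int) :=
  (cs.foldl (fun res c =>
      let base_pos := (c.2.1, c.2.2.1)
      (PySem.List.pyRange 0 c.2.2.2.1 1).foldl (fun res x =>
        (PySem.List.pyRange 0 c.2.2.2.2 1).foldl (fun res y =>
          let pos := (base_pos.1 + x, base_pos.2 + y)
          if res.contains pos then res.insert pos (res.getD pos 0 + 1)
          else res.insert pos 1) res) res)
    PySem.Dict.empty).items.map (fun kv => (kv.1.1, kv.1.2, kv.2))

-- ===== PORT B =====
-- B helper: the list comprehension 'cells' of Source B (all covered cells, with multiplicity)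
def pvCellsB (cs : List (Int × Int × Int × Int × Int)) : List (Int × Int) :=
  cs.flatMap (fun c =>
    (PySem.List.pyRange c.2.1 (c.2.1 + c.2.2.2.1) 1).flatMap (fun x =>
      (PySem.List.pyRange c.2.2.1 (c.2.2.1 + c.2.2.2.2) 1).map (fun y => (x, y))))

-- dict comprehension over dict.fromkeys(cells): keys are distinct, so the dict is the map itself
def histo_alt (cs : List (Int × Int × Int × Int × Int)) : List (Int × Int × Int) :=
  (PySem.List.dedup (pvCellsB cs)).map (fun p =>
    (p.1, p.2,
      cs.foldl (fun n c =>
        if c.2.1 ≤ p.1 ∧ p.1 < c.2.1 + c.2.2.2.1 ∧ c.2.2.1 ≤ p.2 ∧ p.2 < c.2.2.1 + c.2.2.2.2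
        then n + 1 else n) (0 : Int)))

-- ===== PRECONDITION & SPEC =====
def Spec_histo (cs : List (Int × Int × Int × Int × Int)) (out : List (Int × Int × Int)) : Prop := out = histo_alt cs
instance (cs : List (Int × Int × Int × Int × Int)) (out : List (Int × Int × Int)) : Decidable (Spec_histo cs out) := by unfold Spec_histo; infer_instance

-- ===== CLAIM (what is proved, stated in full; the proofs are below) =====
def Claim_equal_histo : Prop := ∀ (cs : List (Int × Int × Int × Int × Int)), Dom_histo cs → Spec_histo cs (histo cs)

-- ===== LEMMAS AND PROOFS =====

-- a 0/1 indicator sum over a list is the count of the marked element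
theorem pvSumIte (l : List Int) (a : Int) :
    (l.map (fun x => if x = a then 1 else 0)).sum = l.count a := by
  rw [List.count_eq_countP]
  induction l with
  | nil => rfl
  | cons x xs ih =>
    simp [List.countP_cons, ih]
    by_cases h : x = a
    · simp [h]; omega
    · simp [h]

-- A's counting step, with the two branches merged (in the absent branch getD gives 0)
theorem pvStepA_eq :
    (fun (res : PySem.Dict (Int × Int) Int) (pos : Int × Int) =>
        if res.contains pos then res.insert pos (res.getD pos 0 + 1) else res.insert pos 1)
    = fun res pos => res.insert pos (res.getD pos 0 + 1) := by
  funext res pos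
  by_cases h : res.contains pos
  · simp [h]
  · simp [h, PySem.Dict.getD_of_not_contains res 0 (by simpa using h)]

-- per-claim cell list: offsets from 0 (A's traversal) = absolute coordinates (B's traversal)
theorem pvCells_claim_eq (bx by' w h : Int) :
    (PySem.List.pyRange bx (bx + w) 1).flatMap (fun x =>
      (PySem.List.pyRange by' (by' + h) 1).map (fun y => (x, y)))
    = (PySem.List.pyRange 0 w 1).flatMap (fun x =>
        (PySem.List.pyRange 0 h 1).map (fun y => (bx + x, by' + y))) := by
  simp [PySem.List.pyRange_one, List.flatMap_map, List.map_map, Function.comp_def]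

-- A's dict is the multiset counter of B's cell list
theorem pvDictA_eq (cs : List (Int × Int × Int × Int × Int)) :
    (cs.foldl (fun res c =>
      let base_pos := (c.2.1, c.2.2.1)
      (PySem.List.pyRange 0 c.2.2.2.1 1).foldl (fun res x =>
        (PySem.List.pyRange 0 c.2.2.2.2 1).foldl (fun res y =>
          let pos := (base_pos.1 + x, base_pos.2 + y)
          if res.contains pos then res.insert pos (res.getD pos 0 + 1)
          else res.insert pos 1) res) res)
    PySem.Dict.empty) = PySem.Dict.counter (pvCellsB cs) := by
  rw [← PySem.Dict.foldl_insert_getD_add_one_eq_counter]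
  unfold pvCellsB
  rw [List.foldl_flatMap]
  congr 1
  funext res c
  rw [pvCells_claim_eq, List.foldl_flatMap]
  dsimp only
  congr 1
  funext a x
  rw [List.foldl_map]
  congr 1
  funext a' y
  exact congrFun (congrFun pvStepA_eq a') (c.2.1 + x, c.2.2.1 + y)

-- multiplicity of a cell in B's cell list = number of claims whose rectangle contains it
theorem pvCount_claim (bx by' w h : Int) (p : Int × Int) :
    ((PySem.List.pyRange bx (bx + w) 1).flatMap (fun x =>
      (PySem.List.pyRange by' (by' + h) 1).map (fun y => (x, y)))).count p
    = if bx ≤ p.1 ∧ p.1 < bx + w ∧ by' ≤ p.2 ∧ p.2 < by' + h then 1 else 0 := by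
  obtain ⟨p1, p2⟩ := p
  rw [List.count_flatMap]
  have inner : ∀ x : Int, (((PySem.List.pyRange by' (by' + h) 1).map (fun y => (x, y))).count (p1, p2))
      = if x = p1 ∧ by' ≤ p2 ∧ p2 < by' + h then 1 else 0 := by
    intro x
    by_cases hx : x = p1
    · subst hx
      rw [show ((x, p2) : Int × Int) = (fun y => (x, y)) p2 from rfl,
        List.count_map_of_injective _ _ (fun a b hab => by simpa using hab)]
      rw [List.Nodup.count (PySem.List.nodup_pyRange_one _ _)]
      simp [PySem.List.mem_pyRange_one]
    · rw [List.count_eq_zero.mpr (by simp [hx])]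
      simp [hx]
  simp only [Function.comp_def, inner]
  by_cases hq : by' ≤ p2 ∧ p2 < by' + h
  · simp only [hq, and_true]
    rw [pvSumIte (PySem.List.pyRange bx (bx + w) 1) p1,
      List.Nodup.count (PySem.List.nodup_pyRange_one _ _)]
    simp [PySem.List.mem_pyRange_one]
  · simp [hq]

theorem pvCount_cells (cs : List (Int × Int × Int × Int × Int)) (p : Int × Int) :
    (((pvCellsB cs).count p : Int))
    = cs.foldl (fun n c =>
        if c.2.1 ≤ p.1 ∧ p.1 < c.2.1 + c.2.2.2.1 ∧ c.2.2.1 ≤ p.2 ∧ p.2 < c.2.2.1 + c.2.2.2.2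
        then n + 1 else n) (0 : Int) := by
  have hstep : (fun (n : Int) (c : Int × Int × Int × Int × Int) =>
        if c.2.1 ≤ p.1 ∧ p.1 < c.2.1 + c.2.2.2.1 ∧ c.2.2.1 ≤ p.2 ∧ p.2 < c.2.2.1 + c.2.2.2.2
        then n + 1 else n)
      = fun n c => if (decide (c.2.1 ≤ p.1 ∧ p.1 < c.2.1 + c.2.2.2.1 ∧ c.2.2.1 ≤ p.2 ∧ p.2 < c.2.2.1 + c.2.2.2.2)) = true
        then n + 1 else n := by
    funext n c
    by_cases hc : c.2.1 ≤ p.1 ∧ p.1 < c.2.1 + c.2.2.2.1 ∧ c.2.2.1 ≤ p.2 ∧ p.2 < c.2.2.1 + c.2.2.2.2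
    · simp [hc]
    · simp [hc]
  rw [hstep, PySem.List.foldl_count_if, zero_add]
  unfold pvCellsB
  rw [List.count_flatMap]
  simp only [Function.comp_def, pvCount_claim]
  have hN : (cs.map (fun c => if c.2.1 ≤ p.1 ∧ p.1 < c.2.1 + c.2.2.2.1 ∧ c.2.2.1 ≤ p.2 ∧ p.2 < c.2.2.1 + c.2.2.2.2 then 1 else 0)).sum
      = cs.countP (fun c => decide (c.2.1 ≤ p.1 ∧ p.1 < c.2.1 + c.2.2.2.1 ∧ c.2.2.1 ≤ p.2 ∧ p.2 < c.2.2.1 + c.2.2.2.2)) := by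
    induction cs with
    | nil => rfl
    | cons c cs ih =>
      by_cases hc : c.2.1 ≤ p.1 ∧ p.1 < c.2.1 + c.2.2.2.1 ∧ c.2.2.1 ≤ p.2 ∧ p.2 < c.2.2.1 + c.2.2.2.2
      · simp [hc, ih]; omega
      · simp [hc, ih]
  rw [hN]

-- ===== VERDICT (by name: the statement is the Claim_ definition above) =====
theorem histo_spec : Claim_equal_histo := by
  intro cs _
  unfold Spec_histo histo histo_alt
  rw [pvDictA_eq, PySem.Dict.items_counter, PySem.List.dedup_eq_ofList, List.map_map]
  refine List.map_congr_left (fun p _ => ?_)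
  simp [pvCount_cells]
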